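-- pv_equiv track=rewrite | github.com/mmge88/iot-integrated-defence | src/HeuristicAlgo.py | returnMax
-- ===== SOURCE A (Python) =====
-- def returnMax(sortedList):
--     val = 0
--     newList = []
--     for i in sortedList:
--         if i[1][0] >= val:
--             newList.append(i[0])
--             val = i[1][0]
--     return newList
-- ===== SOURCE B (Python) =====
-- def returnMax(sortedList):
--     # pass 1: prefix-maximum of thresholds, baselined at 0 (prefix[k] = max of first k thresholds)
--     prefix = [0]
--     for x in sortedList:
--         prefix.append(max(prefix[-1], x[1][0]))
--     # pass 2: keep elements whose threshold reaches the max of all strictly-previous thresholds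
--     return [x[0] for x, m in zip(sortedList, prefix) if x[1][0] >= m]
-- ===== Notes on version B (the rewrite author's own statement) =====
-- stated objective: alternative
-- what changed: Replaces the single stateful accept-and-update loop by a two-pass decomposition: first a prefix-maximum table of the thresholds baselined at 0, then a stateless zip-filter comprehension keeping elements whose threshold meets the max of all strictly-previous thresholds.
import Mathlib
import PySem

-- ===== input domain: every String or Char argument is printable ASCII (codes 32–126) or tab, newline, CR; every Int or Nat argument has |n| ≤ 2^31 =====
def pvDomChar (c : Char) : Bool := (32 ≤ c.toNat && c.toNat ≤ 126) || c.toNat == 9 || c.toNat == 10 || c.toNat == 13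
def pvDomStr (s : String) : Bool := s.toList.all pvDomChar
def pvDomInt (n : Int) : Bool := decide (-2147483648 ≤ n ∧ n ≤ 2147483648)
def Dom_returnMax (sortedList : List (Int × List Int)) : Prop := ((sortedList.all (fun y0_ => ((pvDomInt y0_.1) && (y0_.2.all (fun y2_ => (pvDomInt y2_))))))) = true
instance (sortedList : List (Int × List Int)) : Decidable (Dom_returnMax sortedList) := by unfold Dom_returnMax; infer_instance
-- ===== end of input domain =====

-- B replaces A's stateful accept-and-update loop by a prefix-maximum table plus a stateless zip-filter (alternative decomposition, same cost).

-- ===== PORT A =====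
-- loop state: (val, newList); i[1][0] via pyGet? (none = IndexError, excluded by Pre_, state kept unchanged there)
def returnMax (sortedList : List (Int × List Int)) : List Int :=
  (sortedList.foldl (fun (s : Int × List Int) i =>
      match PySem.List.pyGet? i.2 0 with
      | none => s
      | some t => if t ≥ s.1 then (t, s.2 ++ [i.1]) else s)
    (0, [])).2

-- ===== PORT B =====
-- pass 1: prefix list, prefix[-1] via pyGet? (-1); the list starts nonempty so the getD 0 default is unreachable
def returnMax_alt (sortedList : List (Int × List Int)) : List Int :=
  let pref := sortedList.foldl (fun (p : List Int) x =>
      p ++ [max ((PySem.List.pyGet? p (-1)).getD 0) ((PySem.List.pyGet? x.2 0).getD 0)]) [0]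
  (sortedList.zip pref).filterMap (fun xm =>
      if (PySem.List.pyGet? xm.1.2 0).getD 0 ≥ xm.2 then some xm.1.1 else none)

-- ===== PRECONDITION & SPEC =====
-- Pre_ excludes exactly the inputs where some i[1] is empty: there Python A (and B) raise IndexError on i[1][0].
def Pre_returnMax (sortedList : List (Int × List Int)) : Prop :=
  ∀ p ∈ sortedList, p.2 ≠ []
instance (sortedList : List (Int × List Int)) : Decidable (Pre_returnMax sortedList) := by unfold Pre_returnMax; infer_instance
def pvWitness_returnMax : (List (Int × List Int)) := [(1, [2]), (3, [1, 5]), (4, [2])]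
def Spec_returnMax (sortedList : List (Int × List Int)) (out : List Int) : Prop := out = returnMax_alt sortedList
instance (sortedList : List (Int × List Int)) (out : List Int) : Decidable (Spec_returnMax sortedList out) := by unfold Spec_returnMax; infer_instance

-- ===== CLAIM (what is proved, stated in full; the proofs are below) =====
def Claim_equal_returnMax : Prop := ∀ (sortedList : List (Int × List Int)), Dom_returnMax sortedList → Pre_returnMax sortedList → Spec_returnMax sortedList (returnMax sortedList)

-- ===== LEMMAS AND PROOFS =====

-- common reference function: threshold of an element (its second component's head, 0 if empty — unreachable under Pre_)
def pvThr (x : Int × List Int) : Int := (PySem.List.pyGet? x.2 0).getD 0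

-- the selection both programs compute, as a simple recursion on the list
def pvCore : List (Int × List Int) → Int → List Int
  | [], _ => []
  | x :: r, v => if pvThr x ≥ v then x.1 :: pvCore r (pvThr x) else pvCore r v

lemma pvThr_cons (t : Int) (ts : List Int) (a : Int) :
    pvThr (a, t :: ts) = t := by
  simp [pvThr]

-- A's fold, generalized over the starting state, equals acc ++ pvCore
lemma pvA_fold (l : List (Int × List Int)) (v : Int) (acc : List Int)
    (h : ∀ p ∈ l, p.2 ≠ []) :
    (l.foldl (fun (s : Int × List Int) i =>
        match PySem.List.pyGet? i.2 0 with
        | none => s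
        | some t => if t ≥ s.1 then (t, s.2 ++ [i.1]) else s)
      (v, acc)).2 = acc ++ pvCore l v := by
  induction l generalizing v acc with
  | nil => simp [pvCore]
  | cons x r ih =>
    obtain ⟨a, ts⟩ := x
    have hne : ts ≠ [] := h (a, ts) (by simp)
    obtain ⟨t, ts', rfl⟩ := List.exists_cons_of_ne_nil hne
    have hr : ∀ p ∈ r, p.2 ≠ [] := fun p hp => h p (by simp [hp])
    simp only [List.foldl_cons, PySem.List.pyGet?_zero_cons, pvCore, pvThr_cons]
    by_cases ht : t ≥ v
    · simp [ht, ih _ _ hr]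
    · simp [ht, ih _ _ hr]

-- B's prefix pass: folding onto any list ending in v appends the scan of running maxima
def pvScan : List (Int × List Int) → Int → List Int
  | [], v => [v]
  | x :: r, v => v :: pvScan r (max v (pvThr x))

lemma pvB_prefix (l : List (Int × List Int)) (p : List Int) (v : Int) :
    (l.foldl (fun (p : List Int) x =>
        p ++ [max ((PySem.List.pyGet? p (-1)).getD 0) ((PySem.List.pyGet? x.2 0).getD 0)]) (p ++ [v]))
    = p ++ pvScan l v := by
  induction l generalizing p v with
  | nil => simp [pvScan]
  | cons x r ih =>
    simp only [List.foldl_cons, PySem.List.pyGet?_neg_one_append_singleton, Option.getD_some]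
    have : p ++ [v] ++ [max v (pvThr x)] = (p ++ [v]) ++ [max v (pvThr x)] := by simp
    rw [show (p ++ [v]) ++ [max v ((PySem.List.pyGet? x.2 0).getD 0)]
          = (p ++ [v]) ++ [max v (pvThr x)] from by rfl,
        ih, pvScan]
    simp

-- B's filter pass along the scan equals pvCore
lemma pvB_filter (l : List (Int × List Int)) (v : Int) :
    (l.zip (pvScan l v)).filterMap (fun xm =>
        if (PySem.List.pyGet? xm.1.2 0).getD 0 ≥ xm.2 then some xm.1.1 else none)
    = pvCore l v := by
  induction l generalizing v with
  | nil => simp [pvScan, pvCore]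
  | cons x r ih =>
    simp only [pvScan, List.zip_cons_cons, List.filterMap_cons, pvCore]
    have hthr : (PySem.List.pyGet? x.2 0).getD 0 = pvThr x := rfl
    rw [hthr]
    by_cases ht : pvThr x ≥ v
    · rw [if_pos ht, if_pos ht, max_eq_right ht]
      simp [ih]
    · rw [if_neg ht, if_neg ht]
      have hmax : max v (pvThr x) = v := by omega
      rw [hmax, ih]

-- ===== VERDICT (by name: the statement is the Claim_ definition above) =====
theorem returnMax_spec : Claim_equal_returnMax := by
  intro l _ hpre
  show returnMax l = returnMax_alt l
  unfold returnMax returnMax_alt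
  rw [pvA_fold l 0 [] hpre]
  have := pvB_prefix l [] 0
  simp only [List.nil_append] at this
  rw [this, pvB_filter]
  simp
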